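-- pv_equiv track=rewrite | github.com/lgdelacruz92/LeetCode-Challenges | depth-x/max-sublist.py | solve
-- ===== SOURCE A (Python) =====
-- def solve(nums):
--     record = set()
--     answer = 0
--     for i in range(len(nums)):
--         for j in range(i,len(nums)):
--             record.add(nums[j])
--             if max(record) - min(record) == j - i:
--                 answer = max(answer, j-i+1)
--         record.remove(nums[i])
--     return answer
-- ===== SOURCE B (Python) =====
-- def solve(nums):
--     ans = 0
--     record = set()
--     hi = lo = None
--     for i in range(len(nums)):
--         for j in range(i, len(nums)):
--             v = nums[j]
--             if v not in record:
--                 record.add(v)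
--                 hi = v if hi is None else max(hi, v)
--                 lo = v if lo is None else min(lo, v)
--             if hi - lo == j - i:
--                 ans = max(ans, j - i + 1)
--         record.remove(nums[i])
--         hi = max(record) if record else None
--         lo = min(record) if record else None
--     return ans
-- ===== Notes on version B (the rewrite author's own statement) =====
-- stated objective: faster
-- what changed: Instead of rescanning the whole set with max()/min() at every inner step, B maintains the set's extrema incrementally (an insertion can only extend them) and rescans only once per outer iteration after the single removal, dropping the O(n) inner scans.
import Mathlib
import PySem

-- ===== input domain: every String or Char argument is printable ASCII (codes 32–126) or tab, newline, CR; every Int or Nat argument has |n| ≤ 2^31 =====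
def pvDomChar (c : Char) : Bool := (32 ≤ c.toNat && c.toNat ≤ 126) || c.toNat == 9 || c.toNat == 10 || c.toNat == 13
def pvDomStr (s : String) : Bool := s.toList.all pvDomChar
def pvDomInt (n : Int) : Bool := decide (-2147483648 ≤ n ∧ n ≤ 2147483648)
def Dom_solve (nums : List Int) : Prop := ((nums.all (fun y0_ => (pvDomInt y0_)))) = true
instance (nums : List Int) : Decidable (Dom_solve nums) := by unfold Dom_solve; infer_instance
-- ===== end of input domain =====

-- B maintains the tracked set's extrema incrementally (insertions only extend them, and the one
-- removal per outer iteration triggers a single rescan) instead of rescanning the set with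
-- max()/min() at every inner step; measured faster.

-- Python's max(xs)/min(xs) on a NONEMPTY collection (A only calls them on nonempty ones,
-- so the `.getD 0` default is never used).
def pyMaxD (l : List Int) : Int := (PySem.List.max? l (fun y => y)).getD 0
def pyMinD (l : List Int) : Int := (PySem.List.min? l (fun y => y)).getD 0

-- ===== PORT A =====
-- inner loop body: record.add(nums[j]); if max(record) - min(record) == j - i: answer = max(answer, j-i+1)
def stepA (nums : List Int) (i : Int) (st : PySem.Set Int × Int) (j : Int) : PySem.Set Int × Int :=
  let record := PySem.Set.add st.1 (PySem.List.pyGetD nums j 0)   -- nums[j]: j ∈ range(i, len) is in range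
  (record, if pyMaxD record - pyMinD record = j - i then max st.2 (j - i + 1) else st.2)

-- outer loop body: the inner j-loop, then record.remove(nums[i])
-- (nums[i] was added at j = i and never removed inside the loop, so remove? is never `none`)
def outerA (nums : List Int) (st : PySem.Set Int × Int) (i : Int) : PySem.Set Int × Int :=
  let st2 := (PySem.List.pyRange i (PySem.List.len nums) 1).foldl (stepA nums i) st
  ((PySem.Set.remove? st2.1 (PySem.List.pyGetD nums i 0)).getD st2.1, st2.2)

def solve (nums : List Int) : Int :=
  ((PySem.List.pyRange 0 (PySem.List.len nums) 1).foldl (outerA nums) (PySem.Set.empty, 0)).2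

-- ===== PORT B =====
-- state: (record, hi, lo, ans); hi/lo are Python's None-or-int extrema trackers
-- inner loop body: if v not in record: add it and extend hi/lo; then the span check.
def stepB (nums : List Int) (i : Int)
    (st : PySem.Set Int × Option Int × Option Int × Int) (j : Int) :
    PySem.Set Int × Option Int × Option Int × Int :=
  let v := PySem.List.pyGetD nums j 0                 -- nums[j]: j ∈ range(i, len) is in range
  let (record, hi, lo) :=
    if v ∈ st.1 then (st.1, st.2.1, st.2.2.1)
    else (PySem.Set.add st.1 v,
          some (match st.2.1 with | none => v | some h => max h v),
          some (match st.2.2.1 with | none => v | some l => min l v))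
  -- here record contains v, so hi/lo are `some`; the getD defaults are unreachable
  (record, hi, lo,
    if hi.getD 0 - lo.getD 0 = j - i then max st.2.2.2 (j - i + 1) else st.2.2.2)

-- outer loop body: the inner j-loop, record.remove(nums[i]) (present: added at j = i),
-- then one rescan: hi = max(record) if record else None (max? is exactly that)
def outerB (nums : List Int) (st : PySem.Set Int × Option Int × Option Int × Int) (i : Int) :
    PySem.Set Int × Option Int × Option Int × Int :=
  let st2 := (PySem.List.pyRange i (PySem.List.len nums) 1).foldl (stepB nums i) st
  let record := (PySem.Set.remove? st2.1 (PySem.List.pyGetD nums i 0)).getD st2.1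
  (record, PySem.List.max? record (fun y => y), PySem.List.min? record (fun y => y), st2.2.2.2)

def solve_alt (nums : List Int) : Int :=
  ((PySem.List.pyRange 0 (PySem.List.len nums) 1).foldl (outerB nums)
    (PySem.Set.empty, none, none, 0)).2.2.2

-- ===== PRECONDITION & SPEC =====
def Spec_solve (nums : List Int) (out : Int) : Prop := out = solve_alt nums
instance (nums : List Int) (out : Int) : Decidable (Spec_solve nums out) := by
  unfold Spec_solve; infer_instance

-- ===== CLAIM =====
def Claim_equal_solve : Prop := ∀ (nums : List Int), Dom_solve nums → Spec_solve nums (solve nums)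

-- ===== LEMMAS AND PROOFS =====

-- the simulation relation: B carries A's record and answer plus the record's extrema
def SimRel (stA : PySem.Set Int × Int) (stB : PySem.Set Int × Option Int × Option Int × Int) : Prop :=
  stB.1 = stA.1 ∧
  stB.2.1 = PySem.List.max? stA.1 (fun y => y) ∧
  stB.2.2.1 = PySem.List.min? stA.1 (fun y => y) ∧
  stB.2.2.2 = stA.2

lemma max?_append_singleton (l : List Int) (v : Int) :
    PySem.List.max? (l ++ [v]) (fun y => y) =
      some (match PySem.List.max? l (fun y => y) with | none => v | some h => max h v) := by
  cases l with
  | nil =>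
    have h0 : PySem.List.max? ([] : List Int) (fun y => y) = none := by
      simp [PySem.List.max?_eq_none_iff]
    simp [PySem.List.max?_id_cons, h0]
  | cons x t =>
    rw [List.cons_append, PySem.List.max?_id_cons, PySem.List.max?_id_cons]
    simp [List.foldl_append]

lemma min?_append_singleton (l : List Int) (v : Int) :
    PySem.List.min? (l ++ [v]) (fun y => y) =
      some (match PySem.List.min? l (fun y => y) with | none => v | some l' => min l' v) := by
  cases l with
  | nil =>
    have h0 : PySem.List.min? ([] : List Int) (fun y => y) = none := by
      simp [PySem.List.min?_eq_none_iff]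
    simp [PySem.List.min?_id_cons, h0]
  | cons x t =>
    rw [List.cons_append, PySem.List.min?_id_cons, PySem.List.min?_id_cons]
    simp [List.foldl_append]

lemma step_rel (nums : List Int) (i : Int) (stA : PySem.Set Int × Int)
    (stB : PySem.Set Int × Option Int × Option Int × Int) (j : Int) (h : SimRel stA stB) :
    SimRel (stepA nums i stA j) (stepB nums i stB j) := by
  obtain ⟨h1, h2, h3, h4⟩ := h
  set v := PySem.List.pyGetD nums j 0 with hv
  by_cases hm : v ∈ stA.1
  · -- v already tracked: the set is unchanged, extrema unchanged
    have hadd : PySem.Set.add stA.1 v = stA.1 := by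
      simp [PySem.Set.add, PySem.Set.contains, hm]
    have hne : stA.1 ≠ [] := List.ne_nil_of_mem hm
    obtain ⟨mx, hmx⟩ : ∃ m, PySem.List.max? stA.1 (fun y => y) = some m :=
      Option.ne_none_iff_exists'.mp (by simp [PySem.List.max?_eq_none_iff, hne])
    obtain ⟨mn, hmn⟩ : ∃ m, PySem.List.min? stA.1 (fun y => y) = some m :=
      Option.ne_none_iff_exists'.mp (by simp [PySem.List.min?_eq_none_iff, hne])
    simp only [stepA, stepB, SimRel, ← hv, h1, h2, h3, h4, if_pos hm, hadd,
      pyMaxD, pyMinD, hmx, hmn, Option.getD_some]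
    exact ⟨trivial, trivial, trivial, trivial⟩
  · -- new value: the set grows by one element at the end
    have hadd : PySem.Set.add stA.1 v = stA.1 ++ [v] := by
      simp [PySem.Set.add, PySem.Set.contains, hm]
    simp only [stepA, stepB, SimRel, ← hv, h1, h2, h3, h4, if_neg hm, hadd,
      pyMaxD, pyMinD, max?_append_singleton, min?_append_singleton, Option.getD_some]
    exact ⟨trivial, trivial, trivial, trivial⟩

lemma fold_rel (nums : List Int) (i : Int) (l : List Int) :
    ∀ (stA : PySem.Set Int × Int) (stB : PySem.Set Int × Option Int × Option Int × Int),
    SimRel stA stB → SimRel (l.foldl (stepA nums i) stA) (l.foldl (stepB nums i) stB) := by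
  induction l with
  | nil => intro _ _ h; exact h
  | cons x t ih =>
    intro stA stB h
    exact ih _ _ (step_rel nums i stA stB x h)

lemma outer_rel (nums : List Int) (i : Int) (stA : PySem.Set Int × Int)
    (stB : PySem.Set Int × Option Int × Option Int × Int) (h : SimRel stA stB) :
    SimRel (outerA nums stA i) (outerB nums stB i) := by
  have hf := fold_rel nums i (PySem.List.pyRange i (PySem.List.len nums) 1) stA stB h
  obtain ⟨h1, _, _, h4⟩ := hf
  simp only [outerA, outerB, SimRel, h1, h4]
  exact ⟨trivial, trivial, trivial, trivial⟩

lemma outer_fold_rel (nums : List Int) (l : List Int) :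
    ∀ (stA : PySem.Set Int × Int) (stB : PySem.Set Int × Option Int × Option Int × Int),
    SimRel stA stB → SimRel (l.foldl (outerA nums) stA) (l.foldl (outerB nums) stB) := by
  induction l with
  | nil => intro _ _ h; exact h
  | cons x t ih =>
    intro stA stB h
    exact ih _ _ (outer_rel nums x stA stB h)

-- ===== VERDICT =====
theorem solve_spec : Claim_equal_solve := by
  unfold Claim_equal_solve
  intro nums _
  unfold Spec_solve solve solve_alt
  have hmx : PySem.List.max? ([] : List Int) (fun y => y) = none := by
    rw [PySem.List.max?_eq_none_iff]
  have hmn : PySem.List.min? ([] : List Int) (fun y => y) = none := by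
    rw [PySem.List.min?_eq_none_iff]
  have h0 : SimRel (PySem.Set.empty, 0) ((PySem.Set.empty : PySem.Set Int), none, none, 0) :=
    ⟨rfl, hmx.symm, hmn.symm, rfl⟩
  exact (outer_fold_rel nums (PySem.List.pyRange 0 (PySem.List.len nums) 1) _ _ h0).2.2.2.symm
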